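-- pv_equiv track=rewrite | github.com/Nikil263/Assignment2_NLP | utils/ngrams.py | n15
-- ===== SOURCE A (Python) =====
-- def n15(z,q,f5):
--     r51=[]
--     r55=[]
--     r510=[]
--     co=0
--     for a, b, c, d, e in f5:
--
--         if(c == z and d == q and e!= None):
--             co=co+1
--             if(co==1):
--                 r51.append(e)
--             if(co<=5):
--                 r55.append(e)
--             if(co<=10):
--                 r510.append(e)
--     return r51,r55,r510
-- ===== SOURCE B (Python) =====
-- def n15(z, q, f5):
--     def first_k(k, items):
--         # recursively collect the first k matching e's, stopping early
--         if k == 0 or not items: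
--             return []
--         a, b, c, d, e = items[0]
--         rest = items[1:]
--         if c == z and d == q and e != None:
--             return [e] + first_k(k - 1, rest)
--         return first_k(k, rest)
--     return first_k(1, f5), first_k(5, f5), first_k(10, f5)
-- ===== Notes on version B (the rewrite author's own statement) =====
-- stated objective: alternative
-- what changed: Replaces A's single accumulating pass with a running counter by three independent recursive early-terminating passes first_k(k,·) for k=1,5,10, each of which stops as soon as k matches are found.
import Mathlib
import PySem

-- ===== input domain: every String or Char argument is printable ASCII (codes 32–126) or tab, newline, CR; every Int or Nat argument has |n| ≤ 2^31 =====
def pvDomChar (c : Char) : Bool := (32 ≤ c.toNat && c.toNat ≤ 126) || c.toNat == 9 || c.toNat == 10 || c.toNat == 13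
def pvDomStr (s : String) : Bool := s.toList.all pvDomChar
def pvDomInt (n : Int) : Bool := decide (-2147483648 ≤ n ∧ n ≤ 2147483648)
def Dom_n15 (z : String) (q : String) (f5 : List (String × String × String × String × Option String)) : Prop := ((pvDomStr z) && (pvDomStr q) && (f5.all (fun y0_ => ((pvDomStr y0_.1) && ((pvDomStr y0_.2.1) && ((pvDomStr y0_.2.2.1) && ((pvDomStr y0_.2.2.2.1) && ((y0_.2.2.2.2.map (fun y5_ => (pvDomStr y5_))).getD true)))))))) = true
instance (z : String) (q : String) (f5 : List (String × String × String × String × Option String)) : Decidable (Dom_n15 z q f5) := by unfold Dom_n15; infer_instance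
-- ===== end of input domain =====

-- ===== PORT A =====
-- B makes three independent recursive early-terminating passes instead of A's one counting pass; objective: alternative.
-- loop over f5 carrying (r51, r55, r510, co) exactly as A does; 'e != None' is e.isSome and
-- appending the non-None e is Option.getD (exact, since e.isSome holds on that branch).
def n15Loop (z : String) (q : String) :
    List (String × String × String × String × Option String) →
    List String → List String → List String → Int → List String × List String × List String
  | [], r51, r55, r510, _ => (r51, r55, r510)
  | (_, _, c, d, e) :: rest, r51, r55, r510, co =>
    if c == z && d == q && e.isSome then
      let co' := co + 1
      let r51' := if co' == 1 then r51 ++ [e.getD ""] else r51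
      let r55' := if co' ≤ 5 then r55 ++ [e.getD ""] else r55
      let r510' := if co' ≤ 10 then r510 ++ [e.getD ""] else r510
      n15Loop z q rest r51' r55' r510' co'
    else
      n15Loop z q rest r51 r55 r510 co

def n15 (z : String) (q : String) (f5 : List (String × String × String × String × Option String)) : List String × List String × List String :=
  n15Loop z q f5 [] [] [] 0

-- ===== PORT B =====
-- 'first_k(k, items)': recursion on k and the list, returning as soon as k matches were taken
def n15FirstK (z : String) (q : String) :
    Nat → List (String × String × String × String × Option String) → List String
  | 0, _ => []
  | _ + 1, [] => []
  | k + 1, (_, _, c, d, e) :: rest =>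
    if c == z && d == q && e.isSome then
      e.getD "" :: n15FirstK z q k rest
    else
      n15FirstK z q (k + 1) rest

def n15_alt (z : String) (q : String) (f5 : List (String × String × String × String × Option String)) : List String × List String × List String :=
  (n15FirstK z q 1 f5, n15FirstK z q 5 f5, n15FirstK z q 10 f5)

-- ===== PRECONDITION & SPEC =====
def Spec_n15 (z : String) (q : String) (f5 : List (String × String × String × String × Option String)) (out : List String × List String × List String) : Prop := out = n15_alt z q f5
instance (z : String) (q : String) (f5 : List (String × String × String × String × Option String)) (out : List String × List String × List String) : Decidable (Spec_n15 z q f5 out) := by unfold Spec_n15; infer_instance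

-- ===== CLAIM (what is proved, stated in full; the proofs are below) =====
def Claim_equal_n15 : Prop := ∀ (z : String) (q : String) (f5 : List (String × String × String × String × Option String)), Dom_n15 z q f5 → Spec_n15 z q f5 (n15 z q f5)

-- ===== LEMMAS AND PROOFS =====
-- the list of matching e's, the common characterisation of both ports
def n15Matched (z : String) (q : String) (f5 : List (String × String × String × String × Option String)) : List String :=
  f5.filterMap (fun t => if t.2.2.1 == z && t.2.2.2.1 == q then t.2.2.2.2 else none)

lemma n15FirstK_eq (z q : String) :
    ∀ (f5 : List (String × String × String × String × Option String)) (k : Nat),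
      n15FirstK z q k f5 = (n15Matched z q f5).take k := by
  intro f5
  induction f5 with
  | nil => intro k; cases k <;> simp [n15FirstK, n15Matched]
  | cons t rest ih =>
    intro k
    obtain ⟨a, b, c, d, e⟩ := t
    cases k with
    | zero => simp [n15FirstK]
    | succ k =>
      by_cases hc : (c == z && d == q && e.isSome) = true
      · obtain ⟨s, hs⟩ : ∃ s, e = some s := by
          cases e with
          | none => simp at hc
          | some s => exact ⟨s, rfl⟩
        subst hs
        have hcz : (c == z) = true := by simp_all
        have hdq : (d == q) = true := by simp_all
        have hm : n15Matched z q ((a, b, c, d, some s) :: rest) = s :: n15Matched z q rest := by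
          simp only [n15Matched, List.filterMap_cons]
          simp [hcz, hdq]
        rw [hm]
        simp only [n15FirstK, hc, if_pos, List.take_succ_cons]
        simp [ih k]
      · have hm : n15Matched z q ((a, b, c, d, e) :: rest) = n15Matched z q rest := by
          simp only [n15Matched, List.filterMap_cons]
          cases e with
          | none => simp [ite_self]
          | some s =>
            have hne : ¬ (c = z ∧ d = q) := by
              intro ⟨h1, h2⟩
              simp [h1, h2] at hc
            simp [hne]
        rw [hm]
        simp only [n15FirstK, hc, Bool.false_eq_true, if_neg, not_false_iff]
        exact ih (k + 1)

lemma n15Loop_eq (z q : String) :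
    ∀ (f5 : List (String × String × String × String × Option String))
      (r51 r55 r510 : List String) (co : Int), 0 ≤ co →
    n15Loop z q f5 r51 r55 r510 co =
      (r51 ++ (n15Matched z q f5).take (1 - co).toNat,
       r55 ++ (n15Matched z q f5).take (5 - co).toNat,
       r510 ++ (n15Matched z q f5).take (10 - co).toNat) := by
  intro f5
  induction f5 with
  | nil => intro r51 r55 r510 co _; simp [n15Loop, n15Matched]
  | cons t rest ih =>
    intro r51 r55 r510 co hco
    obtain ⟨a, b, c, d, e⟩ := t
    by_cases hc : (c == z && d == q && e.isSome) = true
    · obtain ⟨s, hs⟩ : ∃ s, e = some s := by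
        cases e with
        | none => simp at hc
        | some s => exact ⟨s, rfl⟩
      subst hs
      have hcz : (c == z) = true := by simp_all
      have hdq : (d == q) = true := by simp_all
      have hm : n15Matched z q ((a, b, c, d, some s) :: rest) = s :: n15Matched z q rest := by
        simp only [n15Matched, List.filterMap_cons]
        simp [hcz, hdq]
      rw [hm]
      simp only [n15Loop, hc, if_pos]
      rw [ih _ _ _ (co + 1) (by omega)]
      refine Prod.ext ?_ (Prod.ext ?_ ?_) <;> simp only
      · by_cases h1 : co + 1 == 1
        · have : co = 0 := by simpa using h1
          subst this
          simp [List.take]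
        · have hge : 1 ≤ co := by
            simp only [beq_iff_eq] at h1; omega
          have e1 : (1 - co).toNat = 0 := by omega
          have e2 : (1 - (co + 1)).toNat = 0 := by omega
          rw [e1, e2, List.take_zero, List.take_zero]
          simp [h1]
      · by_cases h5 : co + 1 ≤ 5
        · have : (5 - co).toNat = (5 - (co + 1)).toNat + 1 := by omega
          simp [h5, this, List.take_succ_cons]
        · simp [h5, show (5 - co).toNat = 0 by omega, show (5 - (co + 1)).toNat = 0 by omega]
      · by_cases h10 : co + 1 ≤ 10
        · have : (10 - co).toNat = (10 - (co + 1)).toNat + 1 := by omega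
          simp [h10, this, List.take_succ_cons]
        · simp [h10, show (10 - co).toNat = 0 by omega, show (10 - (co + 1)).toNat = 0 by omega]
    · have hm : n15Matched z q ((a, b, c, d, e) :: rest) = n15Matched z q rest := by
        simp only [n15Matched, List.filterMap_cons]
        cases e with
        | none => simp [ite_self]
        | some s =>
          have hne : ¬ (c = z ∧ d = q) := by
            intro ⟨h1, h2⟩
            simp [h1, h2] at hc
          simp [hne]
      rw [hm]
      simp only [n15Loop, hc, if_neg, Bool.false_eq_true, not_false_iff]
      exact ih _ _ _ co hco

-- ===== VERDICT (by name: the statement is the Claim_ definition above) =====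
theorem n15_spec : Claim_equal_n15 := by
  intro z q f5 _
  unfold Spec_n15 n15 n15_alt
  rw [n15Loop_eq z q f5 [] [] [] 0 le_rfl,
      n15FirstK_eq z q f5 1, n15FirstK_eq z q f5 5, n15FirstK_eq z q f5 10]
  rfl
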